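-- pv_equiv track=rewrite | github.com/ftiasch/acm-icpc | project-euler/p120.py | solve
-- ===== SOURCE A (Python) =====
-- def solve(a):
--     result = 0
--     for n in range(1, 2 * a):
--         r = n * a + 1
--         if n % 2 == 0:
--             r -= n * a - 1
--         else:
--             r += n * a - 1
--         r %= a * a
--         if r < 0:
--             r += a * a
--         result = max(result, r)
--     return result
-- ===== SOURCE B (Python) =====
-- def solve(a):
--     if a <= 0:
--         return 0
--     return max(2 % (a * a), 2 * a * ((a - 1) // 2))
-- ===== Notes on version B (the rewrite author's own statement) =====
-- stated objective: faster
-- what changed: Replaces the O(a) loop over n in range(1, 2a) with the closed form max(2 % a^2, 2*a*((a-1)//2)): for odd n the residue 2na mod a^2 equals a*(2n mod a), whose maximum over the range is 2a*floor((a-1)/2), and even n contribute 2 mod a^2.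
import Mathlib
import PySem

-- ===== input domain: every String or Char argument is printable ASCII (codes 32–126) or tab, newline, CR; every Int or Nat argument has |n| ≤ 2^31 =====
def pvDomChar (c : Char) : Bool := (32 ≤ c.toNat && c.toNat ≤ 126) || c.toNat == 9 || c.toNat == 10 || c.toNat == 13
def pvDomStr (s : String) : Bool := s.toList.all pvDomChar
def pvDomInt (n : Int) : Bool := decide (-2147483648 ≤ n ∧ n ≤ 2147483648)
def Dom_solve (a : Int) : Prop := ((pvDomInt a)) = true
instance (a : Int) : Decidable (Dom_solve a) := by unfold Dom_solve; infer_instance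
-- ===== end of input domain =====

-- B computes the same maximum by a closed form instead of A's loop over range(1, 2*a).

-- ===== PORT A =====
def solve (a : Int) : Int :=
  (PySem.List.pyRange 1 (2 * a) 1).foldl (fun result n =>
    let r := n * a + 1
    let r := if PySem.Int.mod n 2 == 0 then r - (n * a - 1) else r + (n * a - 1)
    let r := PySem.Int.mod r (a * a)
    let r := if r < 0 then r + a * a else r
    max result r) 0

-- ===== PORT B =====
def solve_alt (a : Int) : Int :=
  if a ≤ 0 then 0
  else max (PySem.Int.mod 2 (a * a)) (2 * a * (PySem.Int.floordiv (a - 1) 2))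

-- ===== PRECONDITION & SPEC =====
def Spec_solve (a : Int) (out : Int) : Prop := out = solve_alt a
instance (a : Int) (out : Int) : Decidable (Spec_solve a out) := by unfold Spec_solve; infer_instance

-- ===== CLAIM (what is proved, stated in full; the proofs are below) =====
def Claim_equal_solve : Prop := ∀ (a : Int), Dom_solve a → Spec_solve a (solve a)

-- ===== LEMMAS AND PROOFS =====

-- the value A's loop body assigns to r, for a given a and n (closed description)
def pvG (a n : Int) : Int := if n % 2 = 0 then 2 % (a * a) else a * ((2 * n) % a)

lemma pvFoldl_max_le {g : Int → Int} :
    ∀ (l : List Int) (init B : Int), init ≤ B → (∀ n ∈ l, g n ≤ B) →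
      l.foldl (fun res n => max res (g n)) init ≤ B := by
  intro l
  induction l with
  | nil => intro init B h _; simpa using h
  | cons m t ih =>
      intro init B h1 h2
      simp only [List.foldl_cons]
      exact ih _ _ (max_le h1 (h2 m (by simp))) (fun n hn => h2 n (by simp [hn]))

lemma pvLe_foldl_max {g : Int → Int} :
    ∀ (l : List Int) (init x : Int), (x ≤ init ∨ ∃ n ∈ l, x ≤ g n) →
      x ≤ l.foldl (fun res n => max res (g n)) init := by
  intro l
  induction l with
  | nil =>
      rintro init x (h | ⟨n, hn, _⟩)
      · simpa using h
      · exact absurd hn (List.not_mem_nil)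
  | cons m t ih =>
      rintro init x (h | ⟨n, hn, hx⟩)
      · exact ih _ _ (Or.inl (le_trans h (le_max_left _ _)))
      · rcases List.mem_cons.mp hn with rfl | hn'
        · exact ih _ _ (Or.inl (le_trans hx (le_max_right _ _)))
        · exact ih _ _ (Or.inr ⟨n, hn', hx⟩)

lemma pvBody_eq (a : Int) (ha : 0 < a) (result n : Int) :
    (let r := n * a + 1
     let r := if PySem.Int.mod n 2 == 0 then r - (n * a - 1) else r + (n * a - 1)
     let r := PySem.Int.mod r (a * a)
     let r := if r < 0 then r + a * a else r
     max result r) = max result (pvG a n) := by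
  have haa : (0:Int) < a * a := by positivity
  have hmod2 : PySem.Int.mod n 2 = n % 2 := PySem.Int.mod_eq_emod_of_pos (by omega)
  simp only [pvG, hmod2, PySem.Int.mod_eq_emod_of_pos haa]
  by_cases h : n % 2 = 0
  · have h2 : n * a + 1 - (n * a - 1) = 2 := by ring
    simp only [h, beq_iff_eq, if_true, h2]
    have hge : (0:Int) ≤ 2 % (a * a) := Int.emod_nonneg 2 (by omega)
    rw [if_neg (by omega)]
  · have h2 : n * a + 1 + (n * a - 1) = a * (2 * n) := by ring
    simp only [h, beq_iff_eq, if_false, h2]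
    rw [Int.mul_emod_mul_of_pos _ _ ha]
    have hge : 0 ≤ a * ((2 * n) % a) :=
      mul_nonneg (by omega) (Int.emod_nonneg _ (by omega))
    rw [if_neg (by omega)]

lemma pvSolve_pos (a : Int) (ha : 0 < a) :
    solve a = (PySem.List.pyRange 1 (2 * a) 1).foldl (fun result n => max result (pvG a n)) 0 := by
  unfold solve
  congr 1
  funext result n
  exact pvBody_eq a ha result n

-- ===== VERDICT (by name: the statement is the Claim_ definition above) =====
theorem solve_spec : Claim_equal_solve := by
  intro a _
  unfold Spec_solve solve_alt
  by_cases ha0 : a ≤ 0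
  · rw [if_pos ha0]
    unfold solve
    rw [PySem.List.pyRange_one_eq_nil (by omega)]
    rfl
  · replace ha0 : 0 < a := by omega
    rw [if_neg (by omega), pvSolve_pos a ha0]
    have haa : (0:Int) < a * a := by positivity
    rw [PySem.Int.mod_eq_emod_of_pos haa, PySem.Int.floordiv_eq_ediv_of_pos (by omega : (0:Int) < 2)]
    set M := 2 * a * ((a - 1) / 2) with hM
    set B := max (2 % (a * a)) M with hB
    have ht2 : (0:Int) ≤ 2 % (a * a) := Int.emod_nonneg 2 (by omega)
    apply le_antisymm
    · apply pvFoldl_max_le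
      · exact le_trans ht2 (le_max_left _ _)
      · intro n _
        unfold pvG
        split_ifs with hpar
        · exact le_max_left _ _
        · set m := (2 * n) % a with hm
          have hlt : m < a := Int.emod_lt_of_pos _ ha0
          have hge : 0 ≤ m := Int.emod_nonneg _ (by omega)
          have hb : m ≤ 2 * ((a - 1) / 2) := by
            by_cases hae : a % 2 = 0
            · have hk : a = 2 * (a / 2) := by omega
              have h2 : m = 2 * (n % (a / 2)) := by
                rw [hm]
                conv_lhs => rw [hk]
                exact Int.mul_emod_mul_of_pos _ _ (by omega)
              set k := n % (a / 2) with hk2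
              omega
            · omega
          calc a * m ≤ a * (2 * ((a - 1) / 2)) :=
                mul_le_mul_of_nonneg_left hb (le_of_lt ha0)
            _ = M := by rw [hM]; ring
            _ ≤ B := le_max_right _ _
    · apply pvLe_foldl_max
      right
      by_cases ha1 : a = 1
      · subst ha1
        refine ⟨1, ?_, ?_⟩
        · rw [PySem.List.mem_pyRange_one]; omega
        · norm_num [hB, hM, pvG]
      · have ha2 : 2 ≤ a := by omega
        rcases max_choice (2 % (a * a)) M with hBe | hBe
        · refine ⟨2, ?_, ?_⟩
          · rw [PySem.List.mem_pyRange_one]; omega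
          · rw [hB, hBe]
            unfold pvG
            rw [if_pos (by norm_num)]
        · by_cases hae : a % 2 = 0
          · refine ⟨a - 1, ?_, ?_⟩
            · rw [PySem.List.mem_pyRange_one]; omega
            · rw [hB, hBe]
              unfold pvG
              rw [if_neg (by omega : ¬(a - 1) % 2 = 0)]
              have he : 2 * (a - 1) = (a - 2) + a * 1 := by ring
              rw [he, Int.add_mul_emod_self_left,
                Int.emod_eq_of_lt (by omega) (by omega)]
              have h2q : 2 * ((a - 1) / 2) = a - 2 := by omega
              exact le_of_eq (by rw [hM, ← h2q]; ring)
          · have hq : 2 * ((a - 1) / 2) = a - 1 := by omega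
            set q := (a - 1) / 2 with hqdef
            have hq0 : 0 ≤ q := by omega
            by_cases hqo : q % 2 = 0
            · refine ⟨q + a, ?_, ?_⟩
              · rw [PySem.List.mem_pyRange_one]; omega
              · rw [hB, hBe]
                unfold pvG
                rw [if_neg (by omega : ¬(q + a) % 2 = 0)]
                have he : 2 * (q + a) = (a - 1) + a * 2 := by omega
                rw [he, Int.add_mul_emod_self_left,
                  Int.emod_eq_of_lt (by omega) (by omega)]
                exact le_of_eq (by rw [hM, ← hq]; ring)
            · refine ⟨q, ?_, ?_⟩
              · rw [PySem.List.mem_pyRange_one]; omega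
              · rw [hB, hBe]
                unfold pvG
                rw [if_neg hqo]
                have he : 2 * q = (a - 1) + a * 0 := by omega
                rw [he, Int.add_mul_emod_self_left,
                  Int.emod_eq_of_lt (by omega) (by omega)]
                exact le_of_eq (by rw [hM, ← hq]; ring)
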